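-- pv_equiv track=rewrite | github.com/alstjrwjd99/BaekJun | 백준/Gold/9466. 텀 프로젝트/텀 프로젝트.py | solution
-- ===== SOURCE A (Python) =====
-- def solution(n, term):
--     team_made = [False] * n
--     visited = [False] * n
--
--     def dfs(node):
--         stack = []
--         current = node
--
--         while True:
--             if visited[current]:
--                 if current in stack:
--                     start = stack.index(current)
--                     for i in range(start, len(stack)):
--                         team_made[stack[i]] = True
--                 break
--
--             visited[current] = True
--             stack.append(current)
--             current = term[current] - 1
--
--     for i in range(n):
--         if not visited[i]:
--             dfs(i)
--
--     return team_made.count(False)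
-- ===== SOURCE B (Python) =====
-- def solution(n, term):
--     # Pointer doubling: g becomes the (2^k)-step successor map with 2^k >= n;
--     # its image over the n nodes is exactly the set of nodes lying on a cycle.
--     g = [term[i] - 1 for i in range(n)]
--     size = 1
--     while size < n:
--         g = [g[g[i]] for i in range(n)]
--         size *= 2
--     return n - len(set(g))
-- ===== Notes on version B (the rewrite author's own statement) =====
-- stated objective: alternative
-- what changed: A's stack-based DFS with in-stack cycle extraction is replaced by pointer doubling: the successor map is composed with itself until its step count 2^k reaches n, and since the image of the n-step map is exactly the set of cycle nodes, the answer is n minus the number of distinct values of that map.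
-- outside the precondition, e.g. on solution(-1, []): A returns 0, B returns -1; on solution(2, [0, 2]): A returns 2, B returns 1
import Mathlib
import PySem

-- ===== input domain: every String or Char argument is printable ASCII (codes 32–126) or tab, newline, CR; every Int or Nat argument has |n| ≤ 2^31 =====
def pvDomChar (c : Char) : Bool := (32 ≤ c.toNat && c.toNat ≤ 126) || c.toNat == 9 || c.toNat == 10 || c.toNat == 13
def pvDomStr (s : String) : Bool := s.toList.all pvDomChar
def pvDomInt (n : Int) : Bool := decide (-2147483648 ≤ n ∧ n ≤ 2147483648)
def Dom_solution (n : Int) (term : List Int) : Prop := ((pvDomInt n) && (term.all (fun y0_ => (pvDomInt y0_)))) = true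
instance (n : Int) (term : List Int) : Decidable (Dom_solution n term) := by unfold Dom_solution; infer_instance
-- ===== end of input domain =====

-- B replaces A's stack-based DFS cycle extraction by pointer doubling on the successor map
-- (alternative algorithm, same return value on the stated domain).

-- ===== PORT A =====

-- termination fact for A's dfs while-loop: marking an unvisited cell visited
-- strictly decreases the number of False cells (cited by pvDfsA's decreasing_by)
theorem pvCountFalseLt (v : List Bool) (c : Int)
    (h : PySem.List.pyGet? v c = some false) :
    (PySem.List.pySetD v c true).count false < v.count false := by
  unfold PySem.List.pyGet? at h
  unfold PySem.List.pySetD PySem.List.pySet?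
  rcases hk : PySem.List.pyIdx? v.length c with _ | k
  · rw [hk] at h; simp at h
  · rw [hk] at h
    simp only [Option.map_some, Option.getD_some, Option.bind_some] at h ⊢
    have hklen : k < v.length := by
      by_contra hge
      rw [List.getElem?_eq_none (by omega)] at h; simp at h
    have hvk : v[k] = false := by
      rw [List.getElem?_eq_getElem hklen] at h; simpa using h
    have hc := List.count_set (a := true) (b := false) (l := v) hklen
    have hpos : 0 < v.count false := by
      have : v[k] ∈ v := List.getElem_mem hklen
      rw [hvk] at this
      exact List.count_pos_iff.mpr this
    simp [hvk] at hc
    omega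

-- the inner `while True:` loop of A's dfs (visited/team threaded instead of mutated)
def pvDfsA (term : List Int) (visited team : List Bool) (stack : List Int) (current : Int) :
    List Bool × List Bool :=
  match h : PySem.List.pyGet? visited current with
  | none => (visited, team)      -- Python raises IndexError here; outside Pre_
  | some true =>
      -- if current in stack: start = stack.index(current); mark stack[start:]
      match PySem.List.index? stack current with
      | none => (visited, team)
      | some start =>
          (visited,
            (PySem.List.pyRange (start : Int) (stack.length : Int) 1).foldl
              (fun tm i => PySem.List.pySetD tm (PySem.List.pyGetD stack i 0) true) team)
  | some false =>
      pvDfsA term (PySem.List.pySetD visited current true) team (stack ++ [current])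
        (PySem.List.pyGetD term current 0 - 1)
  termination_by visited.count false
  decreasing_by exact pvCountFalseLt visited current h

def solution (n : Int) (term : List Int) : Int :=
  let team := List.replicate n.toNat false
  let visited := List.replicate n.toNat false
  let st := (PySem.List.pyRange 0 n 1).foldl
      (fun (s : List Bool × List Bool) i =>
        if PySem.List.pyGetD s.1 i false = false then pvDfsA term s.1 s.2 [] i else s)
      (visited, team)
  (st.2.count false : Int)

-- ===== PORT B =====

-- `while size < n: g = [g[g[i]] for i in range(n)]; size *= 2`
-- (the `1 ≤ size` test only makes the recursion total; the loop is entered with size = 1)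
def pvBLoop (n : Int) (g : List Int) (size : Int) : List Int :=
  if h : 1 ≤ size ∧ size < n then
    pvBLoop n
      ((PySem.List.pyRange 0 n 1).map
        (fun i => PySem.List.pyGetD g (PySem.List.pyGetD g i 0) 0))
      (size * 2)
  else g
  termination_by (n - size).toNat
  decreasing_by omega

def solution_alt (n : Int) (term : List Int) : Int :=
  let g := (PySem.List.pyRange 0 n 1).map (fun i => PySem.List.pyGetD term i 0 - 1)
  let g' := pvBLoop n g 1
  n - (PySem.Set.ofList g').length

-- ===== PRECONDITION & SPEC =====
-- Pre_ restricts to the task's natural domain (n students, successor values 1..n):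
-- it excludes negative n (degenerate 'negative count' input, on which A returns 0) and
-- successor values outside 1..n, where Python's negative-index wraparound makes A mark
-- aliased cells — an accident of A's implementation (or raise IndexError when out of range).
def Pre_solution (n : Int) (term : List Int) : Prop :=
  0 ≤ n ∧ n ≤ (term.length : Int) ∧ ∀ t ∈ term.take n.toNat, 1 ≤ t ∧ t ≤ n

instance (n : Int) (term : List Int) : Decidable (Pre_solution n term) := by
  unfold Pre_solution; infer_instance

def pvWitness_solution : Int × List Int := (3, [2, 3, 1])

def Spec_solution (n : Int) (term : List Int) (out : Int) : Prop := out = solution_alt n term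
instance (n : Int) (term : List Int) (out : Int) : Decidable (Spec_solution n term out) := by
  unfold Spec_solution; infer_instance

-- ===== CLAIM (what is proved, stated in full; the proofs are below) =====
def Claim_equal_solution : Prop := ∀ (n : Int) (term : List Int), Dom_solution n term → Pre_solution n term → Spec_solution n term (solution n term)

-- ===== LEMMAS AND PROOFS =====

def pvPer (n : ℕ) (F : ℕ → ℕ) (i : ℕ) : Prop := ∃ k ∈ Finset.Icc 1 n, F^[k] i = i

def pvMDfs (n : ℕ) (F : ℕ → ℕ) (V T : Finset ℕ) (st : List ℕ) (c : ℕ) :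
    Finset ℕ × Finset ℕ :=
  if c ∈ V then
    match st.idxOf? c with
    | none => (V, T)
    | some k => (V, T ∪ (st.drop k).toFinset)
  else if hc : c < n then
    pvMDfs n F (insert c V) T (st ++ [c]) (F c)
  else (V, T)
  termination_by n - (V ∩ Finset.range n).card
  decreasing_by
    have h1 : (insert c V ∩ Finset.range n) = insert c (V ∩ Finset.range n) := by
      ext x
      simp only [Finset.mem_inter, Finset.mem_insert, Finset.mem_range]
      constructor
      · rintro ⟨h | h, h2⟩
        · exact Or.inl h
        · exact Or.inr ⟨h, h2⟩
      · rintro (rfl | ⟨h, h2⟩)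
        · exact ⟨Or.inl rfl, hc⟩
        · exact ⟨Or.inr h, h2⟩
    have h2 : c ∉ V ∩ Finset.range n := by simp [*]
    have h3 : (V ∩ Finset.range n).card < n := by
      have hss : V ∩ Finset.range n ⊂ Finset.range n := by
        constructor
        · exact Finset.inter_subset_right
        · intro hsub
          exact h2 (hsub (Finset.mem_range.mpr hc))
      simpa using Finset.card_lt_card hss
    rw [h1, Finset.card_insert_of_notMem h2]
    omega

def pvMMain (n : ℕ) (F : ℕ → ℕ) : Finset ℕ × Finset ℕ :=
  (List.range n).foldl
    (fun s i => if i ∈ s.1 then s else pvMDfs n F s.1 s.2 [] i) (∅, ∅)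

structure pvInv (n : ℕ) (F : ℕ → ℕ) (V T : Finset ℕ) (st : List ℕ) (c : ℕ) : Prop where
  hF : ∀ i, i < n → F i < n
  hV : ∀ v ∈ V, v < n
  hstV : ∀ s ∈ st, s ∈ V
  hc : c < n
  hnd : st.Nodup
  hchain : ∀ j, j + 1 < st.length → F (st.getD j 0) = st.getD (j+1) 0
  hlast : ∀ h : st ≠ [], F (st.getLast h) = c
  hclosed : ∀ v ∈ V, v ∉ st → F v ∈ V ∧ F v ∉ st
  hT : ∀ i, i ∈ T ↔ (i ∈ V ∧ i ∉ st ∧ pvPer n F i)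

def pvPost (n : ℕ) (F : ℕ → ℕ) (V : Finset ℕ) (c : ℕ) (r : Finset ℕ × Finset ℕ) : Prop :=
  (∀ v ∈ r.1, v < n) ∧ (∀ v ∈ r.1, F v ∈ r.1) ∧ V ⊆ r.1 ∧ c ∈ r.1 ∧
  (∀ i, i ∈ r.2 ↔ i ∈ r.1 ∧ pvPer n F i)

theorem pvChainIter (F : ℕ → ℕ) (st : List ℕ)
    (hch : ∀ j, j + 1 < st.length → F (st.getD j 0) = st.getD (j+1) 0) :
    ∀ t j, j + t < st.length → F^[t] (st.getD j 0) = st.getD (j + t) 0 := by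
  intro t
  induction t with
  | zero => simp
  | succ t ih =>
    intro j h
    rw [Function.iterate_succ_apply', ih j (by omega)]
    have := hch (j + t) (by omega)
    rw [this, Nat.add_assoc]

theorem pvEscape (F : ℕ → ℕ) (V : Finset ℕ) (st : List ℕ)
    (hcl : ∀ v ∈ V, v ∉ st → F v ∈ V ∧ F v ∉ st) :
    ∀ t x, x ∈ V → x ∉ st → F^[t] x ∈ V ∧ F^[t] x ∉ st := by
  intro t
  induction t with
  | zero => intro x h1 h2; simpa using ⟨h1, h2⟩
  | succ t ih =>
    intro x h1 h2
    rw [Function.iterate_succ_apply']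
    obtain ⟨ha, hb⟩ := ih x h1 h2
    exact hcl _ ha hb

theorem pvLenLe (n : ℕ) (st : List ℕ) (hnd : st.Nodup) (hb : ∀ s ∈ st, s < n) :
    st.length ≤ n := by
  have h1 := List.toFinset_card_of_nodup hnd
  have hsub : st.toFinset ⊆ Finset.range n :=
    fun x hx => Finset.mem_range.mpr (hb x (List.mem_toFinset.mp hx))
  have h2 := Finset.card_le_card hsub
  rw [h1, Finset.card_range] at h2
  exact h2

theorem pvPer_shift {n : ℕ} {F : ℕ → ℕ} {x : ℕ} (h : pvPer n F x) : pvPer n F (F x) := by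
  obtain ⟨k, hk, hfix⟩ := h
  refine ⟨k, hk, ?_⟩
  rw [← Function.iterate_succ_apply, Function.iterate_succ_apply', hfix]

theorem pvPer_iterate {n : ℕ} {F : ℕ → ℕ} {x : ℕ} (t : ℕ) (h : pvPer n F x) :
    pvPer n F (F^[t] x) := by
  induction t with
  | zero => simpa using h
  | succ t ih => rw [Function.iterate_succ_apply']; exact pvPer_shift ih

-- x ∈ st as an index fact
theorem pvMemIdx {st : List ℕ} {x : ℕ} (h : x ∈ st) :
    ∃ j, j < st.length ∧ st.getD j 0 = x := by
  obtain ⟨j, hj, hx⟩ := List.mem_iff_getElem.mp h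
  exact ⟨j, hj, by rw [List.getD_eq_getElem _ _ hj, hx]⟩

theorem pvIdxMem {st : List ℕ} {j : ℕ} (hj : j < st.length) : st.getD j 0 ∈ st := by
  rw [List.getD_eq_getElem _ _ hj]; exact List.getElem_mem hj

-- stack elements are not periodic when the walk escaped the stack (break with c ∉ st)
theorem pvStackNotPer {n : ℕ} {F : ℕ → ℕ} {V T : Finset ℕ} {st : List ℕ} {c : ℕ}
    (inv : pvInv n F V T st c) (hcV : c ∈ V) (hcst : c ∉ st) :
    ∀ s ∈ st, ¬ pvPer n F s := by
  intro s hs hper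
  obtain ⟨j, hj, rfl⟩ := pvMemIdx hs
  obtain ⟨k, hk, hfix⟩ := hper
  simp only [Finset.mem_Icc] at hk
  by_cases hcase : j + k < st.length
  · -- F^[k] st[j] = st[j+k] ≠ st[j]
    have h1 := pvChainIter F st inv.hchain k j hcase
    rw [hfix] at h1
    have : j + k = j := by
      have := inv.hnd.getElem_inj_iff (hi := hcase) (hj := hj)
      apply this.mp
      rw [← List.getD_eq_getElem _ 0 hcase, ← List.getD_eq_getElem _ 0 hj, h1]
    omega
  · -- escapes: F^[st.length - j] st[j] = c, then stays outside st
    have hne : st ≠ [] := by intro h; rw [h] at hj; simp at hj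
    have hstep1 : F^[st.length - 1 - j] (st.getD j 0) = st.getD (st.length - 1) 0 := by
      have := pvChainIter F st inv.hchain (st.length - 1 - j) j (by omega)
      rw [this]; congr 1; omega
    have hstep2 : F^[st.length - j] (st.getD j 0) = c := by
      have harith : st.length - j = (st.length - 1 - j) + 1 := by omega
      rw [harith, Function.iterate_succ_apply', hstep1]
      have := inv.hlast hne
      rw [List.getLast_eq_getElem] at this
      rw [List.getD_eq_getElem _ _ (by omega)]
      convert this using 2
    have hesc := pvEscape F V st inv.hclosed (k - (st.length - j)) c hcV hcst
    have : F^[k] (st.getD j 0) ∉ st := by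
      have harith : k = (k - (st.length - j)) + (st.length - j) := by omega
      rw [harith, Function.iterate_add_apply, hstep2]
      exact hesc.2
    rw [hfix] at this
    exact this (pvIdxMem hj)

-- from stack position j, st.length - j steps reach c
theorem pvToC {n : ℕ} {F : ℕ → ℕ} {V T : Finset ℕ} {st : List ℕ} {c : ℕ}
    (inv : pvInv n F V T st c) :
    ∀ j, j < st.length → F^[st.length - j] (st.getD j 0) = c := by
  intro j hj
  have hne : st ≠ [] := by intro h; rw [h] at hj; simp at hj
  have hstep1 : F^[st.length - 1 - j] (st.getD j 0) = st.getD (st.length - 1) 0 := by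
    have := pvChainIter F st inv.hchain (st.length - 1 - j) j (by omega)
    rw [this]; congr 1; omega
  have harith : st.length - j = (st.length - 1 - j) + 1 := by omega
  rw [harith, Function.iterate_succ_apply', hstep1]
  have := inv.hlast hne
  rw [List.getLast_eq_getElem] at this
  rw [List.getD_eq_getElem _ _ (by omega)]
  convert this using 2

-- when the walk closes a cycle at stack position k0, stack elements from k0 on are periodic
theorem pvSuffixPer {n : ℕ} {F : ℕ → ℕ} {V T : Finset ℕ} {st : List ℕ} {c k0 : ℕ}
    (inv : pvInv n F V T st c) (hk0len : k0 < st.length) (hk0 : st.getD k0 0 = c) :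
    ∀ j, k0 ≤ j → j < st.length → pvPer n F (st.getD j 0) := by
  intro j hk0j hj
  have hlen : st.length ≤ n :=
    pvLenLe n st inv.hnd (fun s hs => inv.hV s (inv.hstV s hs))
  refine ⟨st.length - k0, Finset.mem_Icc.mpr ⟨by omega, by omega⟩, ?_⟩
  have h1 : F^[st.length - j] (st.getD j 0) = st.getD k0 0 := by
    rw [pvToC inv j hj, hk0]
  have h2 : F^[j - k0] (st.getD k0 0) = st.getD j 0 := by
    have := pvChainIter F st inv.hchain (j - k0) k0 (by omega)
    rw [this]; congr 1; omega
  have harith : st.length - k0 = (j - k0) + (st.length - j) := by omega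
  rw [harith, Function.iterate_add_apply, h1, h2]

-- stack elements before k0 are not periodic
theorem pvPrefixNotPer {n : ℕ} {F : ℕ → ℕ} {V T : Finset ℕ} {st : List ℕ} {c k0 : ℕ}
    (inv : pvInv n F V T st c) (hk0len : k0 < st.length) (hk0 : st.getD k0 0 = c) :
    ∀ j, j < k0 → ¬ pvPer n F (st.getD j 0) := by
  intro j hj hper
  have hreach : ∀ t, 1 ≤ t → ∃ i, j < i ∧ i < st.length ∧
      F^[t] (st.getD j 0) = st.getD i 0 := by
    intro t
    induction t with
    | zero => omega
    | succ t ih =>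
      intro _
      by_cases ht : 1 ≤ t
      · obtain ⟨i, hji, hilen, hit⟩ := ih ht
        rw [Function.iterate_succ_apply', hit]
        by_cases hi1 : i + 1 < st.length
        · exact ⟨i + 1, by omega, hi1, inv.hchain i hi1⟩
        · refine ⟨k0, by omega, hk0len, ?_⟩
          have hi : i = st.length - 1 := by omega
          have := pvToC inv i hilen
          rw [hi] at *
          have hone : st.length - (st.length - 1) = 1 := by omega
          rw [hone] at this
          simp only [Function.iterate_one] at this
          rw [this, hk0]
      · have ht0 : t = 0 := by omega
        subst ht0
        refine ⟨j + 1, by omega, by omega, ?_⟩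
        simpa using inv.hchain j (by omega)
  obtain ⟨k, hk, hfix⟩ := hper
  simp only [Finset.mem_Icc] at hk
  obtain ⟨i, hji, hilen, hit⟩ := hreach k (by omega)
  rw [hfix] at hit
  have : j = i := by
    have := inv.hnd.getElem_inj_iff (hi := (by omega : j < st.length)) (hj := hilen)
    apply this.mp
    rw [← List.getD_eq_getElem _ 0 (by omega : j < st.length), ← List.getD_eq_getElem _ 0 hilen, hit]
  omega

-- with c already visited, the whole visited set is closed under F
theorem pvVClosed {n : ℕ} {F : ℕ → ℕ} {V T : Finset ℕ} {st : List ℕ} {c : ℕ}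
    (inv : pvInv n F V T st c) (hcV : c ∈ V) :
    ∀ v ∈ V, F v ∈ V := by
  intro v hv
  by_cases hvst : v ∈ st
  · obtain ⟨j, hj, rfl⟩ := pvMemIdx hvst
    by_cases hj1 : j + 1 < st.length
    · rw [inv.hchain j hj1]
      exact inv.hstV _ (pvIdxMem hj1)
    · have hne : st ≠ [] := by intro h; rw [h] at hj; simp at hj
      have hlast := inv.hlast hne
      rw [List.getLast_eq_getElem] at hlast
      have hj' : j = st.length - 1 := by omega
      have heq : F (st.getD j 0) = c := by
        rw [List.getD_eq_getElem _ _ hj]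
        subst hj'
        exact hlast
      rw [heq]
      exact hcV
  · exact (inv.hclosed v hv hvst).1

theorem pvInv_step {n : ℕ} {F : ℕ → ℕ} {V T : Finset ℕ} {st : List ℕ} {c : ℕ}
    (inv : pvInv n F V T st c) (hcV : c ∉ V) (hc : c < n) :
    pvInv n F (insert c V) T (st ++ [c]) (F c) := by
  have hcst : c ∉ st := fun h => hcV (inv.hstV c h)
  refine ⟨inv.hF, ?_, ?_, inv.hF c hc, ?_, ?_, ?_, ?_, ?_⟩
  · intro v hv
    rcases Finset.mem_insert.mp hv with rfl | hv
    · exact hc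
    · exact inv.hV v hv
  · intro s hs
    rcases List.mem_append.mp hs with hs | hs
    · exact Finset.mem_insert_of_mem (inv.hstV s hs)
    · simp at hs; subst hs; exact Finset.mem_insert_self _ _
  · refine List.Nodup.append inv.hnd (List.nodup_singleton c) ?_
    intro a ha hb
    simp only [List.mem_cons, List.not_mem_nil, or_false] at hb
    subst hb
    exact hcst ha
  · intro j hj
    rw [List.length_append, List.length_cons, List.length_nil] at hj
    by_cases hj1 : j + 1 < st.length
    · rw [List.getD_append _ _ _ _ (by omega), List.getD_append _ _ _ _ hj1]
      exact inv.hchain j hj1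
    · have hj' : j = st.length - 1 := by omega
      have hne : st ≠ [] := by
        intro h
        subst h
        simp only [List.length_nil] at hj1 hj
        omega
      have hlen : 1 ≤ st.length := List.length_pos_iff.mpr hne
      rw [List.getD_append _ _ _ _ (by omega)]
      have h2 : (st ++ [c]).getD (j + 1) 0 = c := by
        rw [List.getD_eq_getElem _ _ (by simp only [List.length_append, List.length_cons, List.length_nil]; omega)]
        rw [List.getElem_append_right (by omega)]
        have h0 : j + 1 - st.length = 0 := by omega
        simp [h0]
      rw [h2]
      have hl := inv.hlast hne
      rw [List.getLast_eq_getElem] at hl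
      rw [List.getD_eq_getElem _ _ (by omega)]
      subst hj'
      exact hl
  · intro h
    rw [List.getLast_concat]
  · intro v hv hvst
    have hvne : v ≠ c := by intro h; subst h; exact hvst (by simp)
    have hvV : v ∈ V := by rcases Finset.mem_insert.mp hv with h | h; exact absurd h hvne; exact h
    have hvst' : v ∉ st := fun h => hvst (by simp [h])
    obtain ⟨h1, h2⟩ := inv.hclosed v hvV hvst'
    refine ⟨Finset.mem_insert_of_mem h1, ?_⟩
    intro h
    rcases List.mem_append.mp h with h | h
    · exact h2 h
    · simp at h; subst h; exact hcV h1
  · intro i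
    rw [inv.hT i]
    constructor
    · rintro ⟨h1, h2, h3⟩
      have hine : i ≠ c := by intro h; subst h; exact hcV h1
      exact ⟨Finset.mem_insert_of_mem h1, by simp [h2, hine], h3⟩
    · rintro ⟨h1, h2, h3⟩
      have hine : i ≠ c := by intro h; subst h; exact h2 (by simp)
      have : i ∈ V := by rcases Finset.mem_insert.mp h1 with h | h; exact absurd h hine; exact h
      exact ⟨this, fun h => h2 (by simp [h]), h3⟩

theorem pvMDfs_spec (n : ℕ) (F : ℕ → ℕ) (V : Finset ℕ) (st : List ℕ) (c : ℕ) :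
    ∀ T, pvInv n F V T st c → pvPost n F V c (pvMDfs n F V T st c) := by
  induction V, st, c using pvMDfs.induct (n := n) (F := F) with
  | case1 V st c hcV hidx =>
    intro T inv
    rw [pvMDfs]
    simp only [if_pos hcV, hidx]
    have hcst : c ∉ st := by
      have h := PySem.List.index?_eq_none_iff (xs := st) (v := c)
      rw [PySem.List.index?_eq_idxOf?] at h
      exact h.mp hidx
    refine ⟨inv.hV, pvVClosed inv hcV, Finset.Subset.refl _, hcV, ?_⟩
    intro i
    rw [inv.hT]
    constructor
    · rintro ⟨h1, _, h3⟩; exact ⟨h1, h3⟩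
    · rintro ⟨h1, h2⟩
      refine ⟨h1, ?_, h2⟩
      intro hist
      exact pvStackNotPer inv hcV hcst i hist h2
  | case2 V st c hcV k0 hidx =>
    intro T inv
    rw [pvMDfs]
    simp only [if_pos hcV, hidx]
    obtain ⟨hk0len, hk0elem, -⟩ :=
      PySem.List.getElem_of_index?_eq_some (xs := st) (v := c) (k := k0)
        (by rw [PySem.List.index?_eq_idxOf?]; exact hidx)
    have hk0 : st.getD k0 0 = c := by rw [List.getD_eq_getElem _ _ hk0len]; exact hk0elem
    have hdrop : ∀ x, x ∈ st.drop k0 ↔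
        ∃ j, k0 ≤ j ∧ j < st.length ∧ st.getD j 0 = x := by
      intro x
      rw [List.mem_iff_getElem]
      constructor
      · rintro ⟨i, hi, rfl⟩
        have hlen : (st.drop k0).length = st.length - k0 := List.length_drop ..
        refine ⟨k0 + i, by omega, by omega, ?_⟩
        rw [List.getD_eq_getElem _ _ (by omega), ← List.getElem_drop (i := k0) (j := i)]
      · rintro ⟨j, hj1, hj2, rfl⟩
        have hlen : (st.drop k0).length = st.length - k0 := List.length_drop ..
        refine ⟨j - k0, by omega, ?_⟩
        rw [List.getElem_drop, List.getD_eq_getElem _ _ (by omega)]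
        congr 1
        omega
    refine ⟨inv.hV, pvVClosed inv hcV, Finset.Subset.refl _, hcV, ?_⟩
    intro i
    rw [Finset.mem_union, List.mem_toFinset, inv.hT]
    constructor
    · rintro (⟨h1, _, h3⟩ | hd)
      · exact ⟨h1, h3⟩
      · obtain ⟨j, hj1, hj2, rfl⟩ := (hdrop i).mp hd
        exact ⟨inv.hstV _ (pvIdxMem hj2), pvSuffixPer inv hk0len hk0 j hj1 hj2⟩
    · rintro ⟨h1, h2⟩
      by_cases hist : i ∈ st
      · right
        obtain ⟨j, hj, rfl⟩ := pvMemIdx hist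
        have hjk0 : k0 ≤ j := by
          by_contra h
          exact pvPrefixNotPer inv hk0len hk0 j (by omega) h2
        exact (hdrop _).mpr ⟨j, hjk0, hj, rfl⟩
      · left
        exact ⟨h1, hist, h2⟩
  | case3 V st c hcV hclt ih =>
    intro T inv
    rw [pvMDfs, if_neg hcV, dif_pos hclt]
    obtain ⟨p1, p2, p3, p4, p5⟩ := ih T (pvInv_step inv hcV hclt)
    exact ⟨p1, p2, fun v hv => p3 (Finset.mem_insert_of_mem hv),
      p3 (Finset.mem_insert_self c V), p5⟩
  | case4 V st c hcV hge =>
    intro T inv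
    exact absurd inv.hc hge

theorem pvFold_spec (n : ℕ) (F : ℕ → ℕ) (hF : ∀ i, i < n → F i < n) :
    ∀ (l : List ℕ) (V T : Finset ℕ),
    (∀ x ∈ l, x < n) →
    (∀ v ∈ V, v < n) → (∀ v ∈ V, F v ∈ V) → (∀ i, i ∈ T ↔ i ∈ V ∧ pvPer n F i) →
    (∀ v ∈ (l.foldl (fun s i => if i ∈ s.1 then s else pvMDfs n F s.1 s.2 [] i) (V, T)).1, v < n) ∧
    (∀ i, i ∈ (l.foldl (fun s i => if i ∈ s.1 then s else pvMDfs n F s.1 s.2 [] i) (V, T)).2 ↔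
        i ∈ (l.foldl (fun s i => if i ∈ s.1 then s else pvMDfs n F s.1 s.2 [] i) (V, T)).1 ∧ pvPer n F i) ∧
    (∀ v ∈ (l.foldl (fun s i => if i ∈ s.1 then s else pvMDfs n F s.1 s.2 [] i) (V, T)).1, F v ∈ (l.foldl (fun s i => if i ∈ s.1 then s else pvMDfs n F s.1 s.2 [] i) (V, T)).1) ∧
    V ⊆ (l.foldl (fun s i => if i ∈ s.1 then s else pvMDfs n F s.1 s.2 [] i) (V, T)).1 ∧
    (∀ x ∈ l, x ∈ (l.foldl (fun s i => if i ∈ s.1 then s else pvMDfs n F s.1 s.2 [] i) (V, T)).1) := by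
  intro l
  induction l with
  | nil =>
    intro V T _ hV hcl hT
    exact ⟨hV, hT, hcl, Finset.Subset.refl _, by simp⟩
  | cons x l ih =>
    intro V T hl hV hcl hT
    simp only [List.foldl_cons]
    by_cases hx : x ∈ V
    · rw [if_pos hx]
      obtain ⟨q1, q2, q3, q4, q5⟩ := ih V T (fun y hy => hl y (List.mem_cons_of_mem _ hy)) hV hcl hT
      refine ⟨q1, q2, q3, q4, ?_⟩
      intro y hy
      rcases List.mem_cons.mp hy with rfl | hy
      · exact q4 hx
      · exact q5 y hy
    · rw [if_neg hx]
      have inv : pvInv n F V T [] x := by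
        refine ⟨hF, hV, by simp, hl x (List.mem_cons_self ..), List.nodup_nil, ?_, ?_, ?_, ?_⟩
        · intro j hj; simp at hj
        · intro h; simp at h
        · intro v hv _; exact ⟨hcl v hv, by simp⟩
        · intro i; rw [hT i]; simp
      obtain ⟨p1, p2, p3, p4, p5⟩ := pvMDfs_spec n F V [] x T inv
      obtain ⟨q1, q2, q3, q4, q5⟩ :=
        ih (pvMDfs n F V T [] x).1 (pvMDfs n F V T [] x).2
          (fun y hy => hl y (List.mem_cons_of_mem _ hy)) p1 p2 p5
      refine ⟨q1, q2, q3, fun v hv => q4 (p3 hv), ?_⟩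
      intro y hy
      rcases List.mem_cons.mp hy with rfl | hy
      · exact q4 p4
      · exact q5 y hy

theorem pvMMain_spec (n : ℕ) (F : ℕ → ℕ) (hF : ∀ i, i < n → F i < n) :
    ∀ i, i ∈ (pvMMain n F).2 ↔ i < n ∧ pvPer n F i := by
  obtain ⟨q1, q2, _, _, q5⟩ :=
    pvFold_spec n F hF (List.range n) ∅ ∅
      (fun x hx => List.mem_range.mp hx) (by simp) (by simp) (by simp)
  intro i
  rw [pvMMain]
  rw [q2 i]
  constructor
  · rintro ⟨h1, h2⟩
    exact ⟨q1 i h1, h2⟩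
  · rintro ⟨h1, h2⟩
    exact ⟨q5 i (List.mem_range.mpr h1), h2⟩

-- ===== bridge: port-A states ↔ model states =====

def pvRepB (nn : ℕ) (v : List Bool) (S : Finset ℕ) : Prop :=
  v.length = nn ∧ ∀ i, i < nn → (v.getD i false = true ↔ i ∈ S)

theorem pvRepB_get {nn : ℕ} {v : List Bool} {S : Finset ℕ} (h : pvRepB nn v S)
    {c : ℕ} (hc : c < nn) :
    PySem.List.pyGet? v ((c : ℕ) : Int) = some (v.getD c false) := by
  have hl := h.1
  rw [PySem.List.pyGet?_natCast]
  rw [List.getElem?_eq_getElem (by omega)]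
  rw [List.getD_eq_getElem _ _ (by omega)]

theorem pvRepB_set {nn : ℕ} {v : List Bool} {S : Finset ℕ} (h : pvRepB nn v S)
    {c : ℕ} (hc : c < nn) :
    pvRepB nn (v.set c true) (insert c S) := by
  obtain ⟨hlen, hmem⟩ := h
  refine ⟨by rw [List.length_set, hlen], ?_⟩
  intro i hi
  have hgi : (v.set c true).getD i false = if c = i then true else v.getD i false := by
    rw [List.getD_eq_getElem _ _ (by rw [List.length_set, hlen]; omega)]
    rw [List.getElem_set]
    split
    · rfl
    · rw [List.getD_eq_getElem _ _ (by omega)]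
  rw [hgi]
  by_cases hic : c = i
  · subst hic
    simp
  · rw [if_neg hic, Finset.mem_insert]
    rw [hmem i hi]
    constructor
    · exact Or.inr
    · rintro (rfl | h)
      · exact absurd rfl hic
      · exact h

theorem pvIndexMap (cm : ℕ) : ∀ (stm : List ℕ),
    PySem.List.index? (stm.map (fun (x : ℕ) => (x : Int))) ((cm : ℕ) : Int) =
    PySem.List.index? stm cm := by
  intro stm
  induction stm with
  | nil => rfl
  | cons x xs ih =>
    by_cases hx : x = cm
    · subst hx
      rw [List.map_cons, PySem.List.index?_cons_self, PySem.List.index?_cons_self]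
    · have hxI : ((x : Int)) ≠ ((cm : Int)) := by exact_mod_cast hx
      rw [List.map_cons, PySem.List.index?_cons_of_ne _ hxI,
        PySem.List.index?_cons_of_ne _ hx, ih]

theorem pvMarkFold (nn : ℕ) :
    ∀ (l : List ℕ) (tm : List Bool) (T : Finset ℕ), pvRepB nn tm T → (∀ s ∈ l, s < nn) →
    pvRepB nn
      ((l.map (fun (x : ℕ) => (x : Int))).foldl (fun tm s => PySem.List.pySetD tm s true) tm)
      (T ∪ l.toFinset) := by
  intro l
  induction l with
  | nil =>
    intro tm T h _
    simp only [List.map_nil, List.foldl_nil, List.toFinset_nil, Finset.union_empty]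
    exact h
  | cons s l ih =>
    intro tm T h hb
    simp only [List.map_cons, List.foldl_cons]
    rw [PySem.List.pySetD_natCast]
    have h1 := pvRepB_set h (hb s (List.mem_cons_self ..))
    have h2 := ih (tm.set s true) (insert s T) h1 (fun y hy => hb y (List.mem_cons_of_mem _ hy))
    have hset : insert s T ∪ l.toFinset = T ∪ (s :: l).toFinset := by
      ext y
      simp only [Finset.mem_union, Finset.mem_insert, List.mem_toFinset, List.mem_cons]
      tauto
    rwa [hset] at h2

theorem pvDfsA_bridge (n : ℕ) (F : ℕ → ℕ) (term : List Int)
    (hcompat : ∀ i, i < n → PySem.List.pyGetD term ((i : ℕ) : Int) 0 - 1 = ((F i : ℕ) : Int)) :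
    ∀ (V : Finset ℕ) (st : List ℕ) (c : ℕ), ∀ (T : Finset ℕ) (v tm : List Bool),
    pvInv n F V T st c → pvRepB n v V → pvRepB n tm T →
    pvRepB n (pvDfsA term v tm (st.map (fun (x : ℕ) => (x : Int))) ((c : ℕ) : Int)).1
      (pvMDfs n F V T st c).1 ∧
    pvRepB n (pvDfsA term v tm (st.map (fun (x : ℕ) => (x : Int))) ((c : ℕ) : Int)).2
      (pvMDfs n F V T st c).2 := by
  intro V st c
  induction V, st, c using pvMDfs.induct (n := n) (F := F) with
  | case1 V st c hcV hidx =>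
    intro T v tm inv hv htm
    have hget := pvRepB_get hv inv.hc
    have htrue : v.getD c false = true := (hv.2 c inv.hc).mpr hcV
    rw [htrue] at hget
    have hidxI : PySem.List.index? (st.map (fun (x : ℕ) => (x : Int))) ((c : ℕ) : Int) = none := by
      rw [pvIndexMap, PySem.List.index?_eq_idxOf?]
      exact hidx
    rw [pvDfsA, pvMDfs]
    simp only [hidxI, if_pos hcV, hidx]
    split
    next h => rw [hget] at h; cases h
    next h => exact ⟨hv, htm⟩
    next h => rw [hget] at h; cases h
  | case2 V st c hcV k0 hidx =>
    intro T v tm inv hv htm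
    have hget := pvRepB_get hv inv.hc
    have htrue : v.getD c false = true := (hv.2 c inv.hc).mpr hcV
    rw [htrue] at hget
    have hidxI : PySem.List.index? (st.map (fun (x : ℕ) => (x : Int))) ((c : ℕ) : Int) = some k0 := by
      rw [pvIndexMap, PySem.List.index?_eq_idxOf?]
      exact hidx
    rw [pvDfsA, pvMDfs]
    simp only [hidxI, if_pos hcV, hidx]
    split
    next h => rw [hget] at h; cases h
    next h =>
      refine ⟨hv, ?_⟩
      have hfold : List.foldl
          (fun tm i => PySem.List.pySetD tm (PySem.List.pyGetD (st.map (fun (x : ℕ) => (x : Int))) i 0) true)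
          tm (PySem.List.pyRange ((k0 : ℕ) : Int) (((st.map (fun (x : ℕ) => (x : Int))).length : ℕ) : Int)) =
          List.foldl (fun tm s => PySem.List.pySetD tm s true) tm
            (List.drop ((k0 : ℕ) : Int).toNat (st.map (fun (x : ℕ) => (x : Int)))) :=
        PySem.List.foldl_pyRange_pyGetD'
          (xs := st.map (fun (x : ℕ) => (x : Int))) (d := 0)
          (f := fun tm s => PySem.List.pySetD tm s true) (init := tm)
          (a := ((k0 : ℕ) : Int)) (by positivity)
      rw [hfold, Int.toNat_natCast, ← List.map_drop]
      exact pvMarkFold n (st.drop k0) tm T htm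
        (fun s hs => inv.hV s (inv.hstV s (List.mem_of_mem_drop hs)))
    next h => rw [hget] at h; cases h
  | case3 V st c hcV hclt ih =>
    intro T v tm inv hv htm
    have hfalse : v.getD c false = false := by
      have h := hv.2 c hclt
      cases hb : v.getD c false
      · rfl
      · exact absurd (h.mp hb) hcV
    have hget := pvRepB_get hv hclt
    rw [hfalse] at hget
    rw [pvDfsA, pvMDfs]
    rw [if_neg hcV, dif_pos hclt]
    split
    next h => rw [hget] at h; cases h
    next h => rw [hget] at h; cases h
    next h =>
      rw [PySem.List.pySetD_natCast]
      have hstack : (st.map (fun (x : ℕ) => (x : Int))) ++ [((c : ℕ) : Int)] =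
          (st ++ [c]).map (fun (x : ℕ) => (x : Int)) := by
        rw [List.map_append, List.map_cons, List.map_nil]
      have hnext : PySem.List.pyGetD term ((c : ℕ) : Int) 0 - 1 = ((F c : ℕ) : Int) :=
        hcompat c hclt
      rw [hstack, hnext]
      exact ih T (v.set c true) tm (pvInv_step inv hcV hclt) (pvRepB_set hv hclt) htm
  | case4 V st c hcV hge =>
    intro T v tm inv hv htm
    exact absurd inv.hc hge


-- ===== B side: the image of F^[s] (s ≥ n) is exactly the set of periodic nodes =====

theorem pvIterLt {n : ℕ} {F : ℕ → ℕ} (hF : ∀ i, i < n → F i < n) :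
    ∀ (t i : ℕ), i < n → F^[t] i < n := by
  intro t
  induction t with
  | zero => intro i hi; simpa using hi
  | succ t ih =>
    intro i hi
    rw [Function.iterate_succ_apply']
    exact hF _ (ih i hi)

theorem pvPerOfIter {n : ℕ} {F : ℕ → ℕ} (hF : ∀ i, i < n → F i < n)
    {j s : ℕ} (hj : j < n) (hs : n ≤ s) : pvPer n F (F^[s] j) := by
  have hmaps : Set.MapsTo (fun k => F^[k] j) ↑(Finset.range (n + 1)) ↑(Finset.range n) := by
    intro k _
    simp only [Finset.coe_range, Set.mem_Iio]
    exact pvIterLt hF k j hj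
  obtain ⟨a, ha, b, hb, hab, heq⟩ :=
    Finset.exists_ne_map_eq_of_card_lt_of_maps_to (by simp) hmaps
  simp only [Finset.mem_range] at ha hb
  -- order a < b without loss of generality
  rcases Nat.lt_or_ge a b with hlt | hge
  · have hper : pvPer n F (F^[a] j) := by
      refine ⟨b - a, Finset.mem_Icc.mpr ⟨by omega, by omega⟩, ?_⟩
      have : F^[b - a + a] j = F^[b - a] (F^[a] j) := Function.iterate_add_apply F (b - a) a j
      rw [← this]
      have hba : b - a + a = b := by omega
      rw [hba, ← heq]
    have : F^[s] j = F^[s - a] (F^[a] j) := by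
      rw [← Function.iterate_add_apply]
      congr 1
      omega
    rw [this]
    exact pvPer_iterate _ hper
  · have hba : b < a := by omega
    have hper : pvPer n F (F^[b] j) := by
      refine ⟨a - b, Finset.mem_Icc.mpr ⟨by omega, by omega⟩, ?_⟩
      have : F^[a - b + b] j = F^[a - b] (F^[b] j) := Function.iterate_add_apply F (a - b) b j
      rw [← this]
      have hab' : a - b + b = a := by omega
      rw [hab', heq]
    have : F^[s] j = F^[s - b] (F^[b] j) := by
      rw [← Function.iterate_add_apply]
      congr 1
      omega
    rw [this]
    exact pvPer_iterate _ hper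

theorem pvExistsPreimage {n : ℕ} {F : ℕ → ℕ} (hF : ∀ i, i < n → F i < n)
    {i s : ℕ} (hi : i < n) (hper : pvPer n F i) :
    ∃ j, j < n ∧ F^[s] j = i := by
  obtain ⟨k, hk, hfix⟩ := hper
  simp only [Finset.mem_Icc] at hk
  have hks : s ≤ k * s := Nat.le_mul_of_pos_left s (by omega)
  refine ⟨F^[k * s - s] i, pvIterLt hF _ i hi, ?_⟩
  rw [← Function.iterate_add_apply]
  have : s + (k * s - s) = k * s := by omega
  rw [this, Function.iterate_mul]
  exact Function.iterate_fixed hfix s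

theorem pvImage_eq {n : ℕ} {F : ℕ → ℕ} (hF : ∀ i, i < n → F i < n)
    {s : ℕ} (hs : n ≤ s) :
    Finset.image (F^[s]) (Finset.range n) = (pvMMain n F).2 := by
  ext i
  rw [pvMMain_spec n F hF i, Finset.mem_image]
  constructor
  · rintro ⟨j, hj, rfl⟩
    rw [Finset.mem_range] at hj
    exact ⟨pvIterLt hF s j hj, pvPerOfIter hF hj hs⟩
  · rintro ⟨h1, h2⟩
    obtain ⟨j, hj, hje⟩ := pvExistsPreimage hF h1 h2
    exact ⟨j, Finset.mem_range.mpr hj, hje⟩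

-- ===== pvBLoop computes F^[s] with s ≥ N =====

theorem pvBLoop_spec (N : ℕ) (F : ℕ → ℕ) (hF : ∀ i, i < N → F i < N)
    (n : Int) (hn : n = (N : Int)) :
    ∀ (g : List Int) (size : Int), 1 ≤ size →
    g = (List.range N).map (fun i => ((F^[size.toNat] i : ℕ) : Int)) →
    ∃ s, N ≤ s ∧ pvBLoop n g size = (List.range N).map (fun i => ((F^[s] i : ℕ) : Int)) := by
  intro g size
  induction g, size using pvBLoop.induct (n := n) with
  | case1 g size hcond ih =>
    intro hsz hg
    rw [pvBLoop, dif_pos hcond]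
    apply ih (by omega)
    have hrange : PySem.List.pyRange 0 n 1 = (List.range N).map (fun (k : ℕ) => (k : Int)) := by
      rw [PySem.List.pyRange_one]
      have : (n - 0).toNat = N := by omega
      rw [this]
      exact List.map_congr_left (fun a _ => by omega)
    rw [hrange, List.map_map]
    have h2 : (size * 2).toNat = size.toNat + size.toNat := by omega
    rw [h2]
    apply List.map_congr_left
    intro k hk
    rw [List.mem_range] at hk
    simp only [Function.comp_apply]
    have hg1 : PySem.List.pyGetD g ((k : ℕ) : Int) 0 = ((F^[size.toNat] k : ℕ) : Int) := by
      rw [PySem.List.pyGetD_natCast, hg, PySem.List.getD_map_range _ _ _ _ hk]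
    have hlt : F^[size.toNat] k < N := pvIterLt hF _ k hk
    have hg2 : PySem.List.pyGetD g ((F^[size.toNat] k : ℕ) : Int) 0 =
        ((F^[size.toNat] (F^[size.toNat] k) : ℕ) : Int) := by
      rw [PySem.List.pyGetD_natCast, hg, PySem.List.getD_map_range _ _ _ _ hlt]
    rw [hg1, hg2, ← Function.iterate_add_apply]
  | case2 g size hcond =>
    intro hsz hg
    refine ⟨size.toNat, by omega, ?_⟩
    rw [pvBLoop, dif_neg hcond]
    exact hg

-- ===== counting: a Bool list against the Finset it represents =====

theorem pvCountFilterCard :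
    ∀ (tm : List Bool),
    ((Finset.range tm.length).filter (fun i => tm.getD i false = true)).card = tm.count true := by
  intro tm
  induction tm using List.reverseRecOn with
  | nil => simp
  | append_singleton tm b ih =>
    rw [List.length_append, List.length_cons, List.length_nil]
    have hpred : ∀ i ∈ Finset.range tm.length,
        ((tm ++ [b]).getD i false = true ↔ tm.getD i false = true) := by
      intro i hi
      rw [Finset.mem_range] at hi
      rw [List.getD_append _ _ _ _ hi]
    have hlastD : (tm ++ [b]).getD tm.length false = b := by
      rw [List.getD_eq_getElem _ _ (by simp)]
      rw [List.getElem_append_right (by omega)]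
      simp
    have hsplit : Finset.range (tm.length + 1) = insert tm.length (Finset.range tm.length) :=
      Finset.range_add_one
    rw [hsplit, Finset.filter_insert, List.count_append]
    have hfc : Finset.filter (fun i => (tm ++ [b]).getD i false = true) (Finset.range tm.length) =
        Finset.filter (fun i => tm.getD i false = true) (Finset.range tm.length) :=
      Finset.filter_congr (fun i hi => by rw [hpred i hi])
    cases b with
    | false =>
      rw [if_neg (by rw [hlastD]; simp)]
      rw [hfc, ih]
      simp
    | true =>
      rw [if_pos (by rw [hlastD])]
      rw [hfc]
      rw [Finset.card_insert_of_notMem (by simp)]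
      rw [ih]
      simp

theorem pvCountFalseLen : ∀ (tm : List Bool), tm.count false + tm.count true = tm.length := by
  intro tm
  induction tm with
  | nil => simp
  | cons b tm ih =>
    cases b <;> simp <;> omega

-- ===== outer loop bridge =====

theorem pvOuterBridge (N : ℕ) (F : ℕ → ℕ) (term : List Int)
    (hF : ∀ i, i < N → F i < N)
    (hcompat : ∀ i, i < N → PySem.List.pyGetD term ((i : ℕ) : Int) 0 - 1 = ((F i : ℕ) : Int)) :
    ∀ (l : List ℕ) (V T : Finset ℕ) (v tm : List Bool),
    pvRepB N v V → pvRepB N tm T →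
    (∀ x ∈ l, x < N) → (∀ u ∈ V, u < N) → (∀ u ∈ V, F u ∈ V) →
    (∀ i, i ∈ T ↔ i ∈ V ∧ pvPer N F i) →
    pvRepB N
      ((l.map (fun (x : ℕ) => (x : Int))).foldl
        (fun (s : List Bool × List Bool) i =>
          if PySem.List.pyGetD s.1 i false = false then pvDfsA term s.1 s.2 [] i else s) (v, tm)).2
      ((l.foldl (fun s i => if i ∈ s.1 then s else pvMDfs N F s.1 s.2 [] i) (V, T)).2) := by
  intro l
  induction l with
  | nil =>
    intro V T v tm hv htm _ _ _ _
    exact htm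
  | cons x l ih =>
    intro V T v tm hv htm hl hV hcl hT
    simp only [List.map_cons, List.foldl_cons]
    have hx : x < N := hl x (List.mem_cons_self ..)
    have hgd : PySem.List.pyGetD v ((x : ℕ) : Int) false = v.getD x false := by
      rw [PySem.List.pyGetD_natCast]
    by_cases hxV : x ∈ V
    · have htrue : v.getD x false = true := (hv.2 x hx).mpr hxV
      rw [hgd, htrue, if_neg (by simp), if_pos hxV]
      exact ih V T v tm hv htm (fun y hy => hl y (List.mem_cons_of_mem _ hy)) hV hcl hT
    · have hfalse : v.getD x false = false := by
        cases hb : v.getD x false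
        · rfl
        · exact absurd ((hv.2 x hx).mp hb) hxV
      rw [hgd, hfalse, if_pos rfl, if_neg hxV]
      have inv : pvInv N F V T [] x := by
        refine ⟨hF, hV, by simp, hx, List.nodup_nil, ?_, ?_, ?_, ?_⟩
        · intro j hj; simp at hj
        · intro h; simp at h
        · intro u hu _; exact ⟨hcl u hu, by simp⟩
        · intro i; rw [hT i]; simp
      have hbridge := pvDfsA_bridge N F term hcompat V [] x T v tm inv hv htm
      rw [List.map_nil] at hbridge
      obtain ⟨p1, p2, p3, p4, p5⟩ := pvMDfs_spec N F V [] x T inv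
      exact ih (pvMDfs N F V T [] x).1 (pvMDfs N F V T [] x).2 _ _
        hbridge.1 hbridge.2 (fun y hy => hl y (List.mem_cons_of_mem _ hy)) p1 p2 p5

-- ===== final assembly =====

theorem pvMain (n : Int) (term : List Int) (hpre : Pre_solution n term) :
    solution n term = solution_alt n term := by
  obtain ⟨h0, hlen, hvals⟩ := hpre
  have hnN : n = ((n.toNat : ℕ) : Int) := by omega
  have hlenN : n.toNat ≤ term.length := by omega
  -- the successor map on ℕ
  set F : ℕ → ℕ := fun i => (PySem.List.pyGetD term ((i : ℕ) : Int) 0 - 1).toNat with hFdef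
  have hti : ∀ i, i < n.toNat → 1 ≤ term.getD i 0 ∧ term.getD i 0 ≤ n := by
    intro i hi
    have hgetel : term.getD i 0 = term[i]'(by omega) := List.getD_eq_getElem _ _ (by omega)
    have hlt : i < (term.take n.toNat).length := by
      rw [List.length_take]
      omega
    have htake : (term.take n.toNat)[i]'hlt = term[i]'(by omega) := List.getElem_take ..
    have hmem : term[i]'(by omega) ∈ term.take n.toNat := by
      rw [← htake]
      exact List.getElem_mem hlt
    rw [hgetel]
    exact hvals _ hmem
  have hcompat : ∀ i, i < n.toNat →
      PySem.List.pyGetD term ((i : ℕ) : Int) 0 - 1 = ((F i : ℕ) : Int) := by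
    intro i hi
    obtain ⟨h1, h2⟩ := hti i hi
    rw [hFdef]
    simp only [PySem.List.pyGetD_natCast]
    rw [Int.toNat_of_nonneg (by omega)]
  have hF : ∀ i, i < n.toNat → F i < n.toNat := by
    intro i hi
    obtain ⟨h1, h2⟩ := hti i hi
    rw [hFdef]
    simp only [PySem.List.pyGetD_natCast]
    omega
  have hrange : PySem.List.pyRange 0 n 1 = (List.range n.toNat).map (fun (k : ℕ) => (k : Int)) := by
    rw [PySem.List.pyRange_one]
    have h00 : (n - 0).toNat = n.toNat := by omega
    rw [h00]
    exact List.map_congr_left (fun a _ => by omega)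
  -- A side: rewrite the port fold over the mapped range
  have hAval : solution n term =
      (((((List.range n.toNat).map (fun (k : ℕ) => (k : Int))).foldl
        (fun (s : List Bool × List Bool) i =>
          if PySem.List.pyGetD s.1 i false = false then pvDfsA term s.1 s.2 [] i else s)
        (List.replicate n.toNat false, List.replicate n.toNat false)).2.count false : ℕ) : Int) := by
    show ((((PySem.List.pyRange 0 n 1).foldl
        (fun (s : List Bool × List Bool) i =>
          if PySem.List.pyGetD s.1 i false = false then pvDfsA term s.1 s.2 [] i else s)
        (List.replicate n.toNat false, List.replicate n.toNat false)).2.count false : ℕ) : Int) = _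
    rw [hrange]
  have hrep0 : pvRepB n.toNat (List.replicate n.toNat false) (∅ : Finset ℕ) := by
    refine ⟨List.length_replicate, ?_⟩
    intro i hi
    rw [List.getD_replicate _ hi]
    simp
  have hbridge := pvOuterBridge n.toNat F term hF hcompat (List.range n.toNat) ∅ ∅
    (List.replicate n.toNat false) (List.replicate n.toNat false) hrep0 hrep0
    (fun x hx => List.mem_range.mp hx) (by simp) (by simp) (by simp)
  have hmm : (List.range n.toNat).foldl
      (fun s i => if i ∈ s.1 then s else pvMDfs n.toNat F s.1 s.2 [] i)
      ((∅ : Finset ℕ), (∅ : Finset ℕ)) = pvMMain n.toNat F := rfl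
  rw [hmm] at hbridge
  have hspec := pvMMain_spec n.toNat F hF
  -- counting on the A side
  have hTlen := hbridge.1
  have hTf_eq : (pvMMain n.toNat F).2 =
      (Finset.range ((((List.range n.toNat).map (fun (k : ℕ) => (k : Int))).foldl
        (fun (s : List Bool × List Bool) i =>
          if PySem.List.pyGetD s.1 i false = false then pvDfsA term s.1 s.2 [] i else s)
        (List.replicate n.toNat false, List.replicate n.toNat false)).2.length)).filter
      (fun i => (((List.range n.toNat).map (fun (k : ℕ) => (k : Int))).foldl
        (fun (s : List Bool × List Bool) i =>
          if PySem.List.pyGetD s.1 i false = false then pvDfsA term s.1 s.2 [] i else s)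
        (List.replicate n.toNat false, List.replicate n.toNat false)).2.getD i false = true) := by
    ext i
    rw [Finset.mem_filter, Finset.mem_range, hTlen]
    constructor
    · intro hi
      have hiN : i < n.toNat := ((hspec i).mp hi).1
      exact ⟨hiN, (hbridge.2 i hiN).mpr hi⟩
    · rintro ⟨hiN, hgd⟩
      exact (hbridge.2 i hiN).mp hgd
  have hcard : (pvMMain n.toNat F).2.card =
      (((List.range n.toNat).map (fun (k : ℕ) => (k : Int))).foldl
        (fun (s : List Bool × List Bool) i =>
          if PySem.List.pyGetD s.1 i false = false then pvDfsA term s.1 s.2 [] i else s)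
        (List.replicate n.toNat false, List.replicate n.toNat false)).2.count true := by
    rw [hTf_eq, pvCountFilterCard]
  have hsum := pvCountFalseLen (((List.range n.toNat).map (fun (k : ℕ) => (k : Int))).foldl
        (fun (s : List Bool × List Bool) i =>
          if PySem.List.pyGetD s.1 i false = false then pvDfsA term s.1 s.2 [] i else s)
        (List.replicate n.toNat false, List.replicate n.toNat false)).2
  -- B side
  have hg0 : (PySem.List.pyRange 0 n 1).map (fun i => PySem.List.pyGetD term i 0 - 1) =
      (List.range n.toNat).map (fun i => ((F^[(1 : Int).toNat] i : ℕ) : Int)) := by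
    rw [hrange, List.map_map]
    apply List.map_congr_left
    intro k hk
    rw [List.mem_range] at hk
    simp only [Function.comp_apply]
    rw [hcompat k hk]
    norm_num
  obtain ⟨sb, hsbN, hgfin⟩ := pvBLoop_spec n.toNat F hF n hnN
    ((PySem.List.pyRange 0 n 1).map (fun i => PySem.List.pyGetD term i 0 - 1)) 1 (by norm_num) hg0
  have hBval : solution_alt n term =
      n - ((PySem.Set.ofList ((List.range n.toNat).map
        (fun i => ((F^[sb] i : ℕ) : Int)))).length : Int) := by
    show n - ((PySem.Set.ofList (pvBLoop n ((PySem.List.pyRange 0 n 1).map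
        (fun i => PySem.List.pyGetD term i 0 - 1)) 1)).length : Int) = _
    rw [hgfin]
  have hnd := PySem.Set.nodup_ofList ((List.range n.toNat).map (fun i => ((F^[sb] i : ℕ) : Int)))
  have hcard2 : (PySem.Set.ofList ((List.range n.toNat).map
      (fun i => ((F^[sb] i : ℕ) : Int)))).length = (pvMMain n.toNat F).2.card := by
    have h1 : (PySem.Set.ofList ((List.range n.toNat).map
        (fun i => ((F^[sb] i : ℕ) : Int)))).toFinset.card =
        (PySem.Set.ofList ((List.range n.toNat).map
        (fun i => ((F^[sb] i : ℕ) : Int)))).length := List.toFinset_card_of_nodup hnd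
    have h2 : (PySem.Set.ofList ((List.range n.toNat).map
        (fun i => ((F^[sb] i : ℕ) : Int)))).toFinset =
        ((List.range n.toNat).map (fun i => ((F^[sb] i : ℕ) : Int))).toFinset := by
      ext z
      simp only [List.mem_toFinset, PySem.Set.mem_ofList]
    have h3 : ((List.range n.toNat).map (fun i => ((F^[sb] i : ℕ) : Int))).toFinset =
        Finset.image (fun (x : ℕ) => (x : Int)) (Finset.image (F^[sb]) (Finset.range n.toNat)) := by
      rw [Finset.image_image]
      ext z
      simp only [List.mem_toFinset, List.mem_map, List.mem_range,
        Finset.mem_image, Finset.mem_range, Function.comp_apply]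
    rw [← h1, h2, h3, Finset.card_image_of_injective _ Nat.cast_injective,
      pvImage_eq hF hsbN]
  -- put the two sides together
  rw [hAval, hBval, hcard2]
  omega

-- ===== VERDICT (by name: the statement is the Claim_ definition above) =====
theorem solution_spec : Claim_equal_solution := by
  unfold Claim_equal_solution
  intro n term _ hpre
  unfold Spec_solution
  exact pvMain n term hpre
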